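-- pv_equiv track=rewrite | github.com/v1tzl1/puzzlotope | puzzlotope/combinations.py | getNofM
-- ===== SOURCE A (Python) =====
-- import copy
--
-- def getNofM(N, M):
-- 	prefixes=[[],]
-- 	for i in range(M):
-- 		tmp=[]
-- 		for prefix in prefixes:
-- 			tmp+=list(__getOptions(N, M-i, prefix))
-- 		prefixes=tmp
-- 	return prefixes
--
-- def __getOptions(N, remDim, prefix):
-- 	remValues=N-sum(prefix)
-- 	if remDim==1:
-- 		yield __append(prefix, remValues)
-- 		return
-- 	for num in range(remValues+1):
-- 		yield __append(prefix, num)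
--
-- def __append(a,b):
-- 	ret=copy.copy(a)
-- 	ret.append(b)
-- 	return ret
-- ===== SOURCE B (Python) =====
-- def getNofM(N, M):
--     if M < 1:
--         return [[]]
--     if M == 1:
--         return [[N]]
--     out = []
--     for first in range(N + 1):
--         for rest in getNofM(N - first, M - 1):
--             out.append([first] + rest)
--     return out
-- ===== Notes on version B (the rewrite author's own statement) =====
-- stated objective: simpler
-- what changed: A builds all length-i prefixes breadth-first in an outer loop over dimensions with a generator per prefix; B is a direct recursion on M that picks the first part and recurses on the remaining sum and dimensions (base cases M==1 -> [[N]], M<1 -> [[]]), producing the same lexicographic list.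
import Mathlib
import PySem

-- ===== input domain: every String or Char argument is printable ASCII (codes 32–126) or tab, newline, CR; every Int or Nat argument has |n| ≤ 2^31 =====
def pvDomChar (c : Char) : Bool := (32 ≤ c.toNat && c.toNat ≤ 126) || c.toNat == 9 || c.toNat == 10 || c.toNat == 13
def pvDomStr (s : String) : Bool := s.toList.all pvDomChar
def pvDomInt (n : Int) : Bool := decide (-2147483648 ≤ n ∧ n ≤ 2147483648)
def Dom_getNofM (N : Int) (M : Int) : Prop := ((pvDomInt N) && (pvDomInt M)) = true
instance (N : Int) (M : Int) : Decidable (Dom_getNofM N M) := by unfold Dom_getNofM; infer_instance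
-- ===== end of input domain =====

-- B replaces A's iterative pfx-breadth-first generation with a direct recursion on M
-- (objective: simpler); same return value for all inputs.


-- ===== PORT A =====
-- __getOptions(N, remDim, pfx) as the list of its yields
def pvGetOptions (N : Int) (remDim : Int) (pfx : List Int) : List (List Int) :=
  let remValues := N - pfx.sum
  if remDim == 1 then [pfx ++ [remValues]]
  else (PySem.List.pyRange 0 (remValues + 1) 1).map (fun num => pfx ++ [num])

def getNofM (N : Int) (M : Int) : List (List Int) :=
  (PySem.List.pyRange 0 M 1).foldl
    (fun pfxes i =>
      pfxes.foldl (fun tmp pfx => tmp ++ pvGetOptions N (M - i) pfx) [])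
    [[]]

-- ===== PORT B =====
-- recursion of Source B, with the (strictly positive) dimension count as Nat fuel
def pvAltGo (N : Int) : Nat → List (List Int)
  | 0 => [[]]
  | 1 => [[N]]
  | (m + 2) =>
      (PySem.List.pyRange 0 (N + 1) 1).flatMap
        (fun first => (pvAltGo (N - first) (m + 1)).map (fun rest => first :: rest))

def getNofM_alt (N : Int) (M : Int) : List (List Int) :=
  if M < 1 then [[]] else pvAltGo N M.toNat

-- ===== PRECONDITION & SPEC =====
def Spec_getNofM (N : Int) (M : Int) (out : List (List Int)) : Prop := out = getNofM_alt N M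
instance (N : Int) (M : Int) (out : List (List Int)) : Decidable (Spec_getNofM N M out) := by unfold Spec_getNofM; infer_instance

-- ===== CLAIM (what is proved, stated in full; the proofs are below) =====
def Claim_equal_getNofM : Prop := ∀ (N : Int) (M : Int), Dom_getNofM N M → Spec_getNofM N M (getNofM N M)

-- ===== LEMMAS AND PROOFS =====

-- A's outer loop, restated by recursion on the number of remaining dimensions d:
-- the step with remDim = d is applied first, then d-1, …, 1.
def pvLoopA (N : Int) : Nat → List (List Int) → List (List Int)
  | 0, P => P
  | (d + 1), P => pvLoopA N d (P.flatMap (fun p => pvGetOptions N (d + 1) p))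

lemma foldl_app_eq_flatMap (P : List (List Int)) (f : List Int → List (List Int))
    (acc : List (List Int)) :
    P.foldl (fun tmp p => tmp ++ f p) acc = acc ++ P.flatMap f := by
  induction P generalizing acc with
  | nil => simp
  | cons p ps ih => simp [ih, List.append_assoc]

-- A's fold over pyRange 0 M equals pvLoopA, for the tail of the range:
lemma getNofM_fold_eq (N M : Int) (d : Nat) (hd : (d : Int) ≤ M) (P : List (List Int)) :
    (PySem.List.pyRange (M - d) M 1).foldl
      (fun pfxes i =>
        pfxes.foldl (fun tmp pfx => tmp ++ pvGetOptions N (M - i) pfx) [])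
      P = pvLoopA N d P := by
  induction d generalizing P with
  | zero => simp [pvLoopA, PySem.List.pyRange_one_eq_nil]
  | succ k ih =>
      rw [PySem.List.pyRange_one_cons (by push_cast at hd ⊢; omega)]
      have h1 : M - (↑(k + 1)) + 1 = M - k := by push_cast; ring
      have h2 : M - (M - (↑(k + 1))) = (↑(k + 1) : Int) := by ring
      simp only [List.foldl_cons, h1, h2]
      rw [ih (by push_cast at hd ⊢; omega)]
      simp only [pvLoopA, foldl_app_eq_flatMap, List.nil_append, List.flatMap_def]
      norm_num

-- the main invariant: pvLoopA on positive d maps each pfx to all its pvAltGo-extensions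
lemma pvLoopA_eq (N : Int) (d : Nat) (hd : 0 < d) (P : List (List Int)) :
    pvLoopA N d P
      = P.flatMap (fun p => (pvAltGo (N - p.sum) d).map (fun r => p ++ r)) := by
  induction d generalizing P with
  | zero => omega
  | succ k ih =>
      cases k with
      | zero =>
          simp [pvLoopA, pvGetOptions, pvAltGo]
      | succ m =>
          show pvLoopA N (m + 1) _ = _
          rw [ih (by omega), List.flatMap_assoc]
          apply List.flatMap_congr
          intro p _
          simp only [pvGetOptions]
          rw [if_neg (by simp; omega)]
          simp only [pvAltGo]
          rw [List.flatMap_map, List.map_flatMap]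
          apply List.flatMap_congr
          intro num _
          simp [List.map_map, Function.comp_def, sub_sub]

-- ===== VERDICT (by name: the statement is the Claim_ definition above) =====
theorem getNofM_spec : Claim_equal_getNofM := by
  intro N M _
  show getNofM N M = getNofM_alt N M
  unfold getNofM getNofM_alt
  by_cases hM : M < 1
  · rw [PySem.List.pyRange_one_eq_nil (by omega)]
    simp [hM]
  · have hM' : (M.toNat : Int) = M := Int.toNat_of_nonneg (by omega)
    have := getNofM_fold_eq N M M.toNat (by omega) [[]]
    rw [hM', sub_self] at this
    rw [this, pvLoopA_eq N M.toNat (by omega)]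
    simp [hM]
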